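-- pv_equiv track=rewrite | github.com/uogbuji/amara3-names | pylib/utils.py | namelist_possibilities
-- ===== SOURCE A (Python) =====
-- import itertools
--
-- STICKY_NAME_PARTS = ['jr', 'jnr', 'sr', 'snr', 'md', 'phd', 'esq', 'i', 'ii', 'iii', 'iv', 'iiii', 'v', 'vi', 'vii', 'viii', 'ix', 'x']
--
-- def pairwise(iterable):
--     "s -> (s0,s1), (s1,s2), (s2, s3), ..."
--     a, b = itertools.tee(iterable)
--     next(b, None)
--     return zip(a, b)
--
-- def namelist_possibilities(namestr):
--     '''
--     Warning: it is a good idea to call normalize on any string sent to this function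
--
--     >>> from amara3.names.utils import normalize, namelist_possibilities
--     >>> namelist_possibilities(normalize('DiCamillo, Kate, Van Dusen, Chris'))
--     [['dicamillo', 'kate', 'van dusen', 'chris'], ['dicamillo', 'kate', 'van dusen, chris'], ['dicamillo', 'kate, van dusen', 'chris'], ['dicamillo, kate', 'van dusen', 'chris']]
--     >>> namelist_possibilities(normalize('Krentz, Jayne Anne'))
--     [['krentz', 'jayne anne'], ['krentz, jayne anne']]
--     >>> namelist_possibilities(normalize('Uche Ogbuji'))
--     [['uche ogbuji']]
--     >>> namelist_possibilities(normalize('Ogbuji, Uche'))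
--     [['ogbuji', 'uche'], ['ogbuji, uche']]
--     >>> namelist_possibilities(normalize('King, Martin Luther, Jr.'))
--     [['king', 'martin luther, jr'], ['king, martin luther, jr']]
--     >>> namelist_possibilities(normalize('Churchill, Winston, 1871-1947'))
--     [['churchill', 'winston'], ['churchill, winston']]
--     '''
--     possibilities = []
--     #Divvy up into comma-separated segments, then omit empties & ones e.g. from "1900-1990"
--     raw_segments = [ seg.strip() for seg in namestr.split(',') if seg.strip() ]
--     raw_segments = [ seg for seg in raw_segments if seg and not seg.isdigit() ]
--     segments = []
--     skip_next = False
--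
--     if not raw_segments:
--         return []
--
--     #Any sticky segments, e.g. "jr" or "III"? Stick them back
--     for pre, seg in pairwise(raw_segments):
--         if skip_next:
--             skip_next = False
--             continue
--         if seg in STICKY_NAME_PARTS:
--             segments.append(f'{pre}, {seg}')
--             skip_next = True
--         else:
--             segments.append(pre)
--     if raw_segments[-1] not in STICKY_NAME_PARTS: segments.append(raw_segments[-1])
--
--     #Special cases pairwise wouldn't cover
--     if len(segments) == 1: return [segments]
--     if len(segments) == 2: return [segments, [f'{segments[0]}, {segments[1]}']]
--
--     #Arrange permutations of name with each comma interpreted as inversion as well as separator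
--     stems = []
--     for ix, (segthis, segnext) in enumerate(pairwise(segments)):
--         if not stems:
--             stems = [[segthis, None], [f'{segthis}, {segnext}']]
--             continue
--         if ix < len(segments) - 2:
--             new_stems = []
--             for stem in stems:
--                 if stem[-1] == None:
--                     new_stems.append(stem[:-1] + [segthis, None])
--                     new_stems.append(stem[:-1] + [f'{segthis}, {segnext}'])
--                 else:
--                     new_stems.append(stem + [segnext])
--             stems = new_stems
--         else:
--             for stem in stems:
--                 if stem[-1] == None:
--                     possibilities.append(stem[:-1] + [segthis, segnext])
--                     possibilities.append(stem[:-1] + [f'{segthis}, {segnext}'])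
--                 else:
--                     possibilities.append(stem + [segnext])
--
--     return possibilities
-- ===== SOURCE B (Python) =====
-- STICKY_NAME_PARTS = ['jr', 'jnr', 'sr', 'snr', 'md', 'phd', 'esq', 'i', 'ii', 'iii', 'iv', 'iiii', 'v', 'vi', 'vii', 'viii', 'ix', 'x']
--
-- def namelist_possibilities(namestr):
--     # preprocessing identical to the original: split/strip, drop empty & digit-only segments
--     raw_segments = [seg.strip() for seg in namestr.split(',') if seg.strip()]
--     raw_segments = [seg for seg in raw_segments if seg and not seg.isdigit()]
--     if not raw_segments:
--         return []
--     # sticky-part merge (same as the original)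
--     segments = []
--     skip_next = False
--     for pre, seg in zip(raw_segments, raw_segments[1:]):
--         if skip_next:
--             skip_next = False
--             continue
--         if seg in STICKY_NAME_PARTS:
--             segments.append(f'{pre}, {seg}')
--             skip_next = True
--         else:
--             segments.append(pre)
--     if raw_segments[-1] not in STICKY_NAME_PARTS:
--         segments.append(raw_segments[-1])
--     if not segments:
--         return []
--     # each possibility has at most one joined pair: enumerate directly,
--     # all-plain first, then the single merge position from right to left
--     out = [list(segments)]
--     for j in range(len(segments) - 2, -1, -1):
--         out.append(segments[:j] + [f'{segments[j]}, {segments[j+1]}'] + segments[j+2:])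
--     return out
-- ===== Notes on version B (the rewrite author's own statement) =====
-- stated objective: simpler
-- what changed: Keeps the comma-split/strip/digit-filter and sticky-part merge verbatim, but replaces the stems/None state machine and the n==1/n==2 special cases with a direct enumeration: the all-plain segment list first, then, for each merge position j from right to left, the list with segments j and j+1 joined.
import Mathlib
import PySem

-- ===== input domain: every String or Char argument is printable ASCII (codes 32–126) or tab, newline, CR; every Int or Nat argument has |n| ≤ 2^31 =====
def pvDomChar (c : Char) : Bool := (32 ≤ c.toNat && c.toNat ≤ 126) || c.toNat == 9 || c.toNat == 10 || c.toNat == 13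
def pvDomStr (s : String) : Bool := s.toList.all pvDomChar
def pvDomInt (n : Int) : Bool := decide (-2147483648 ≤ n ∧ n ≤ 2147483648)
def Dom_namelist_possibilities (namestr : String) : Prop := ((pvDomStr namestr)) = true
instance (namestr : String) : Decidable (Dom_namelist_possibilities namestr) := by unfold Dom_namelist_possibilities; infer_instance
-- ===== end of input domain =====

-- B replaces A's stems/None state machine (and its n==1/n==2 special cases) with a direct
-- right-to-left enumeration of the single merge position; same preprocessing, same output order.


-- ===== PORT A =====
-- module constant STICKY_NAME_PARTS (module constant, as used by A)
def pvStickyA : List String :=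
  ["jr", "jnr", "sr", "snr", "md", "phd", "esq", "i", "ii", "iii", "iv", "iiii",
   "v", "vi", "vii", "viii", "ix", "x"]

-- Preprocessing (identical lines in both Pythons), as ported for A:
-- raw_segments = [seg.strip() for seg in namestr.split(',') if seg.strip()]   (strip is idempotent,
--   so filtering the stripped values is the same comprehension)
-- raw_segments = [seg for seg in raw_segments if seg and not seg.isdigit()]
def pvRawSegmentsA (namestr : String) : List String :=
  -- split? is none only for an empty separator; "," is nonempty, so getD is exact
  let raws := (PySem.Str.split? namestr ",").getD []
  let raw1 := (raws.map PySem.Str.strip).filter (fun seg => seg ≠ "")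
  raw1.filter (fun seg => seg ≠ "" && !(PySem.Str.strIsdigit seg))

-- The sticky-part merge loop (identical in both Pythons), as ported for A.
-- State: (segments so far, skip_next). raw_segments is nonempty at the call site, so
-- the Python index raw_segments[-1] is in range and pyGetD is exact.
def pvStickyMergeA (raw_segments : List String) : List String :=
  let st := (raw_segments.zip raw_segments.tail).foldl
    (fun (st : List String × Bool) pr =>
      if st.2 then (st.1, false)
      else if pvStickyA.contains pr.2 then (st.1 ++ [pr.1 ++ ", " ++ pr.2], true)
      else (st.1 ++ [pr.1], false)) ([], false)
  if !(pvStickyA.contains (PySem.List.pyGetD raw_segments (-1) "")) then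
    st.1 ++ [PySem.List.pyGetD raw_segments (-1) ""]
  else st.1

-- A's loop body over enumerate(pairwise(segments)); a Python stem (list of strings, possibly
-- ending in None) is modelled as (the string entries, trailing-None flag).
def pvStepA (n : Nat) (st : List (List String × Bool) × List (List String))
    (p : Int × (String × String)) : List (List String × Bool) × List (List String) :=
  let ix := p.1
  let segthis := p.2.1
  let segnext := p.2.2
  if st.1.isEmpty then
    ([([segthis], true), ([segthis ++ ", " ++ segnext], false)], st.2)
  else if ix < (n : Int) - 2 then
    (st.1.foldl (fun ns stem =>
      if stem.2 then
        ns ++ [(stem.1 ++ [segthis], true), (stem.1 ++ [segthis ++ ", " ++ segnext], false)]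
      else ns ++ [(stem.1 ++ [segnext], false)]) [], st.2)
  else
    (st.1, st.1.foldl (fun ps stem =>
      if stem.2 then
        ps ++ [stem.1 ++ [segthis, segnext], stem.1 ++ [segthis ++ ", " ++ segnext]]
      else ps ++ [stem.1 ++ [segnext]]) st.2)

def namelist_possibilities (namestr : String) : List (List String) :=
  let raw_segments := pvRawSegmentsA namestr
  if raw_segments.isEmpty then []
  else
    let segments := pvStickyMergeA raw_segments
    if segments.length = 1 then [segments]
    else if segments.length = 2 then
      [segments, [PySem.List.pyGetD segments 0 "" ++ ", " ++ PySem.List.pyGetD segments 1 ""]]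
    else
      ((PySem.List.enumerate (segments.zip segments.tail)).foldl
        (pvStepA segments.length) ([], [])).2

-- ===== PORT B =====
-- module constant STICKY_NAME_PARTS (module constant, as used by B)
def pvStickyB : List String :=
  ["jr", "jnr", "sr", "snr", "md", "phd", "esq", "i", "ii", "iii", "iv", "iiii",
   "v", "vi", "vii", "viii", "ix", "x"]

-- Preprocessing (identical lines in both Pythons), as ported for B:
-- raw_segments = [seg.strip() for seg in namestr.split(',') if seg.strip()]   (strip is idempotent,
--   so filtering the stripped values is the same comprehension)
-- raw_segments = [seg for seg in raw_segments if seg and not seg.isdigit()]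
def pvRawSegmentsB (namestr : String) : List String :=
  -- split? is none only for an empty separator; "," is nonempty, so getD is exact
  let raws := (PySem.Str.split? namestr ",").getD []
  let raw1 := (raws.map PySem.Str.strip).filter (fun seg => seg ≠ "")
  raw1.filter (fun seg => seg ≠ "" && !(PySem.Str.strIsdigit seg))

-- The sticky-part merge loop (identical in both Pythons), as ported for B.
-- State: (segments so far, skip_next). raw_segments is nonempty at the call site, so
-- the Python index raw_segments[-1] is in range and pyGetD is exact.
def pvStickyMergeB (raw_segments : List String) : List String :=
  let st := (raw_segments.zip raw_segments.tail).foldl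
    (fun (st : List String × Bool) pr =>
      if st.2 then (st.1, false)
      else if pvStickyB.contains pr.2 then (st.1 ++ [pr.1 ++ ", " ++ pr.2], true)
      else (st.1 ++ [pr.1], false)) ([], false)
  if !(pvStickyB.contains (PySem.List.pyGetD raw_segments (-1) "")) then
    st.1 ++ [PySem.List.pyGetD raw_segments (-1) ""]
  else st.1

def namelist_possibilities_alt (namestr : String) : List (List String) :=
  let raw_segments := pvRawSegmentsB namestr
  if raw_segments.isEmpty then []
  else
    let segments := pvStickyMergeB raw_segments
    if segments.isEmpty then []
    else
      -- out = [list(segments)]; for j in range(len(segments)-2, -1, -1): out.append(...)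
      (PySem.List.pyRange ((segments.length : Int) - 2) (-1) (-1)).foldl
        (fun out j => out ++
          [PySem.List.slice segments none (some j) ++
           [PySem.List.pyGetD segments j "" ++ ", " ++ PySem.List.pyGetD segments (j + 1) ""] ++
           PySem.List.slice segments (some (j + 2)) none])
        [segments]

-- ===== PRECONDITION & SPEC =====
def Spec_namelist_possibilities (namestr : String) (out : List (List String)) : Prop := out = namelist_possibilities_alt namestr
instance (namestr : String) (out : List (List String)) : Decidable (Spec_namelist_possibilities namestr out) := by unfold Spec_namelist_possibilities; infer_instance

-- ===== CLAIM (what is proved, stated in full; the proofs are below) =====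
def Claim_equal_namelist_possibilities : Prop := ∀ (namestr : String), Dom_namelist_possibilities namestr → Spec_namelist_possibilities namestr (namelist_possibilities namestr)

-- ===== LEMMAS AND PROOFS =====

-- the list with segments j and j+1 joined (common normal form of both enumerations)
def pvMergeAt (segs : List String) (j : Nat) : List String :=
  segs.take j ++ (segs.getD j "" ++ ", " ++ segs.getD (j + 1) "") :: segs.drop (j + 2)

-- the common value of both enumerations for nonempty segments
def pvOutAll (segs : List String) : List (List String) :=
  segs :: (List.range (segs.length - 1)).map (fun k => pvMergeAt segs (segs.length - 2 - k))

-- A's stems after the pairs with indices 0..m-1 have been processed (1 ≤ m ≤ n-2)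
def pvStemsAt (segs : List String) (m : Nat) : List (List String × Bool) :=
  (segs.take m, true) ::
    (List.range m).map (fun k => (pvMergeAt (segs.take (m + 1)) (m - 1 - k), false))

theorem pv_getD_take (segs : List String) (i m : Nat) (h : i < m) (d : String) :
    (segs.take m).getD i d = segs.getD i d := by
  rw [List.getD_eq_getElem?_getD, List.getD_eq_getElem?_getD, List.getElem?_take_of_lt h]

theorem pv_mergeAt_take_extend (segs : List String) (j m : Nat)
    (hj : j + 2 ≤ m) (hm : m < segs.length) :
    pvMergeAt (segs.take m) j ++ [segs.getD m ""] = pvMergeAt (segs.take (m + 1)) j := by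
  have hlen : (segs.take m).length = m := by simp; omega
  have htake : segs.take (m + 1) = segs.take m ++ [segs[m]] := by
    rw [List.take_add_one, List.getElem?_eq_getElem hm]; rfl
  unfold pvMergeAt
  rw [htake,
      List.take_append_of_le_length (by omega),
      List.getD_append _ _ _ j (by omega),
      List.getD_append _ _ _ (j + 1) (by omega),
      List.drop_append_of_le_length (by omega)]
  have hgd : segs.getD m "" = segs[m] := by
    rw [List.getD_eq_getElem?_getD, List.getElem?_eq_getElem hm]; rfl
  simp [List.getElem?_eq_getElem hm]

theorem pv_take_snoc (segs : List String) (i : Nat) (h : i < segs.length) :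
    segs.take i ++ [segs.getD i ""] = segs.take (i + 1) := by
  rw [List.take_add_one, List.getElem?_eq_getElem h]
  simp [List.getD_eq_getElem?_getD, List.getElem?_eq_getElem h]

theorem pv_stepA_init (segs : List String) (poss : List (List String))
    (h : 2 ≤ segs.length) :
    pvStepA segs.length ([], poss) ((0 : Int), (segs.getD 0 "", segs.getD 1 "")) =
      (pvStemsAt segs 1, poss) := by
  obtain ⟨a, segs1⟩ : ∃ a t, segs = a :: t := by
    cases segs with
    | nil => simp at h
    | cons a t => exact ⟨a, t, rfl⟩
  obtain ⟨t, rfl⟩ := segs1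
  obtain ⟨b, u, rfl⟩ : ∃ b u, t = b :: u := by
    cases t with
    | nil => simp at h
    | cons b u => exact ⟨b, u, rfl⟩
  simp [pvStepA, pvStemsAt, pvMergeAt, List.getD]

theorem pv_stepA_mid (segs : List String) (m : Nat) (poss : List (List String))
    (_h1 : 1 ≤ m) (h2 : m + 2 < segs.length) :
    pvStepA segs.length (pvStemsAt segs m, poss)
        ((m : Int), (segs.getD m "", segs.getD (m + 1) "")) =
      (pvStemsAt segs (m + 1), poss) := by
  have hc : (m : Int) < (segs.length : Int) - 2 := by omega
  have hcong : ∀ (acc : List (List String × Bool)), ∀ x ∈ pvStemsAt segs m,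
      (fun ns (stem : List String × Bool) =>
        if stem.2 then
          ns ++ [(stem.1 ++ [segs.getD m ""], true),
                 (stem.1 ++ [segs.getD m "" ++ ", " ++ segs.getD (m + 1) ""], false)]
        else ns ++ [(stem.1 ++ [segs.getD (m + 1) ""], false)]) acc x =
      (fun ns (stem : List String × Bool) =>
        ns ++ (if stem.2 then
          [(stem.1 ++ [segs.getD m ""], true),
           (stem.1 ++ [segs.getD m "" ++ ", " ++ segs.getD (m + 1) ""], false)]
        else [(stem.1 ++ [segs.getD (m + 1) ""], false)])) acc x := by
    intro acc x _; by_cases hx : x.2 <;> simp [hx]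
  have hne : (pvStemsAt segs m).isEmpty = false := by simp [pvStemsAt]
  unfold pvStepA
  simp only [hne, Bool.false_eq_true, if_false, hc, if_pos]
  rw [PySem.List.foldl_congr_mem _ _ _ _ hcong,
      PySem.List.foldl_append_eq_flatMap]
  simp only [pvStemsAt, List.flatMap_cons, List.flatMap_map, if_true, Bool.false_eq_true,
    if_false, List.nil_append, ← List.map_eq_flatMap, List.range_succ_eq_map, List.map_cons,
    List.map_map]
  have hmlt : m < segs.length := by omega
  have hE1 : segs.take m ++ [segs.getD m ""] = segs.take (m + 1) :=
    pv_take_snoc segs m hmlt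
  have hE2 : segs.take m ++ [segs.getD m "" ++ ", " ++ segs.getD (m + 1) ""] =
      pvMergeAt (segs.take (m + 2)) m := by
    unfold pvMergeAt
    rw [pv_getD_take segs m (m + 2) (by omega), pv_getD_take segs (m + 1) (m + 2) (by omega)]
    simp [List.take_take]
  have hE3 : ∀ a ∈ List.range m,
      ((pvMergeAt (segs.take (m + 1)) (m - 1 - a) ++ [segs.getD (m + 1) ""], false)
        : List String × Bool) =
      (pvMergeAt (segs.take (m + 2)) (m - 1 - a), false) := by
    intro a ha
    rw [List.mem_range] at ha
    rw [pv_mergeAt_take_extend segs (m - 1 - a) (m + 1) (by omega) (by omega)]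
  have h12 : 1 + (m + 1) = m + 2 := by omega
  rw [hE1, hE2, List.map_congr_left hE3]
  simp [Nat.sub_sub, Nat.add_comm, h12]

theorem pv_stepA_last (segs : List String) (m : Nat) (poss : List (List String))
    (h1 : 1 ≤ m) (h2 : m + 2 = segs.length) :
    pvStepA segs.length (pvStemsAt segs m, poss)
        ((m : Int), (segs.getD m "", segs.getD (m + 1) "")) =
      (pvStemsAt segs m, poss ++ pvOutAll segs) := by
  have hc : ¬((m : Int) < (segs.length : Int) - 2) := by omega
  have hne : (pvStemsAt segs m).isEmpty = false := by simp [pvStemsAt]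
  have hcong : ∀ (acc : List (List String)), ∀ x ∈ pvStemsAt segs m,
      (fun ps (stem : List String × Bool) =>
        if stem.2 then
          ps ++ [stem.1 ++ [segs.getD m "", segs.getD (m + 1) ""],
                 stem.1 ++ [segs.getD m "" ++ ", " ++ segs.getD (m + 1) ""]]
        else ps ++ [stem.1 ++ [segs.getD (m + 1) ""]]) acc x =
      (fun ps (stem : List String × Bool) =>
        ps ++ (if stem.2 then
          [stem.1 ++ [segs.getD m "", segs.getD (m + 1) ""],
           stem.1 ++ [segs.getD m "" ++ ", " ++ segs.getD (m + 1) ""]]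
        else [stem.1 ++ [segs.getD (m + 1) ""]])) acc x := by
    intro acc x _; by_cases hx : x.2 <;> simp [hx]
  unfold pvStepA
  simp only [hne, Bool.false_eq_true, if_false, hc]
  rw [PySem.List.foldl_congr_mem _ _ _ _ hcong, PySem.List.foldl_append_eq_flatMap]
  have hfull : segs.take (m + 2) = segs := List.take_of_length_le (by omega)
  have hs1 : segs.take m ++ [segs.getD m ""] = segs.take (m + 1) :=
    pv_take_snoc segs m (by omega)
  have hs2 : segs.take (m + 1) ++ [segs.getD (m + 1) ""] = segs := by
    rw [pv_take_snoc segs (m + 1) (by omega)]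
    have : m + 1 + 1 = m + 2 := by omega
    rw [this, hfull]
  have hF1 : segs.take m ++ [segs.getD m "", segs.getD (m + 1) ""] = segs := by
    have : segs.take m ++ [segs.getD m "", segs.getD (m + 1) ""] =
        (segs.take m ++ [segs.getD m ""]) ++ [segs.getD (m + 1) ""] := by simp
    rw [this, hs1, hs2]
  have hF2 : segs.take m ++ [segs.getD m "" ++ ", " ++ segs.getD (m + 1) ""] =
      pvMergeAt segs m := by
    have := pv_getD_take segs m (m + 2) (by omega)
    have := pv_getD_take segs (m + 1) (m + 2) (by omega)
    unfold pvMergeAt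
    have hdrop : segs.drop (m + 2) = [] := List.drop_of_length_le (by omega)
    have htk : segs.take m = segs.take m := rfl
    simp [hdrop]
  have hF3 : ∀ a ∈ List.range m,
      (pvMergeAt (segs.take (m + 1)) (m - 1 - a) ++ [segs.getD (m + 1) ""]
        : List String) = pvMergeAt segs (m - 1 - a) := by
    intro a ha
    rw [List.mem_range] at ha
    rw [pv_mergeAt_take_extend segs (m - 1 - a) (m + 1) (by omega) (by omega), hfull]
  simp only [pvStemsAt, List.flatMap_cons, List.flatMap_map, if_true, Bool.false_eq_true,
    if_false, ← List.map_eq_flatMap]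
  rw [hF1, hF2, List.map_congr_left hF3]
  unfold pvOutAll
  have hlen1 : segs.length - 1 = m + 1 := by omega
  have hlen2 : segs.length - 2 = m := by omega
  rw [hlen1, hlen2, List.range_succ_eq_map]
  simp [Nat.sub_sub, Nat.add_comm]

theorem pv_pairs_drop (segs : List String) (m : Nat) (h : m + 2 ≤ segs.length) :
    (segs.zip segs.tail).drop m =
      (segs.getD m "", segs.getD (m + 1) "") :: (segs.zip segs.tail).drop (m + 1) := by
  have hm : m < (segs.zip segs.tail).length := by
    simp only [List.length_zip, List.length_tail]; omega
  rw [List.drop_eq_getElem_cons hm]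
  congr 1
  rw [List.getElem_zip]
  have ht : m < segs.tail.length := by simp only [List.length_tail]; omega
  rw [List.getElem_tail ht, List.getD_eq_getElem segs "" (by omega : m < segs.length),
      List.getD_eq_getElem segs "" (by omega : m + 1 < segs.length)]

theorem pv_foldA_tail (segs : List String) (t : Nat) :
    ∀ m : Nat, 1 ≤ m → segs.length = m + 2 + t →
    ((PySem.List.enumerate ((segs.zip segs.tail).drop m) (m : Int)).foldl
        (pvStepA segs.length) (pvStemsAt segs m, [])).2 = pvOutAll segs := by
  induction t with
  | zero =>
    intro m h1 hlen
    rw [pv_pairs_drop segs m (by omega),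
        List.drop_of_length_le (by simp only [List.length_zip, List.length_tail]; omega)]
    simp only [PySem.List.enumerate_cons, List.foldl_cons]
    rw [pv_stepA_last segs m [] h1 (by omega)]
    simp [PySem.List.enumerate]
  | succ t ih =>
    intro m h1 hlen
    rw [pv_pairs_drop segs m (by omega)]
    simp only [PySem.List.enumerate_cons, List.foldl_cons]
    rw [pv_stepA_mid segs m [] h1 (by omega)]
    have hcast : (m : Int) + 1 = ((m + 1 : Nat) : Int) := by push_cast; ring
    rw [hcast]
    exact ih (m + 1) (by omega) (by omega)

theorem pv_enumA_eq (segs : List String) (h3 : 3 ≤ segs.length) :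
    ((PySem.List.enumerate (segs.zip segs.tail)).foldl
        (pvStepA segs.length) ([], [])).2 = pvOutAll segs := by
  have h0 : segs.zip segs.tail =
      (segs.getD 0 "", segs.getD 1 "") :: (segs.zip segs.tail).drop 1 := by
    have := pv_pairs_drop segs 0 (by omega)
    simpa using this
  rw [h0, PySem.List.enumerate_cons, List.foldl_cons,
      pv_stepA_init segs [] (by omega)]
  have hcast : (0 : Int) + 1 = ((1 : Nat) : Int) := by norm_num
  rw [hcast]
  exact pv_foldA_tail segs (segs.length - 3) 1 (by omega) (by omega)

theorem pv_enumB_eq (segs : List String) (h1 : 1 ≤ segs.length) :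
    (PySem.List.pyRange ((segs.length : Int) - 2) (-1) (-1)).foldl
        (fun out j => out ++
          [PySem.List.slice segs none (some j) ++
           [PySem.List.pyGetD segs j "" ++ ", " ++ PySem.List.pyGetD segs (j + 1) ""] ++
           PySem.List.slice segs (some (j + 2)) none])
        [segs] = pvOutAll segs := by
  rw [PySem.List.pyRange_neg_one]
  have hT : (((segs.length : Int) - 2) - (-1)).toNat = segs.length - 1 := by omega
  rw [hT, List.foldl_map, PySem.List.foldl_append_singleton_eq_map]
  unfold pvOutAll
  have hpt : ∀ k ∈ List.range (segs.length - 1),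
      (PySem.List.slice segs none (some ((segs.length : Int) - 2 - k)) ++
       [PySem.List.pyGetD segs ((segs.length : Int) - 2 - k) "" ++ ", " ++
        PySem.List.pyGetD segs ((segs.length : Int) - 2 - k + 1) ""] ++
       PySem.List.slice segs (some ((segs.length : Int) - 2 - k + 2)) none
        : List String) = pvMergeAt segs (segs.length - 2 - k) := by
    intro k hk
    rw [List.mem_range] at hk
    have hj : (segs.length : Int) - 2 - k = ((segs.length - 2 - k : Nat) : Int) := by omega
    have h1 : ((segs.length - 2 - k : Nat) : Int) + 1 = ((segs.length - 2 - k + 1 : Nat) : Int) := by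
      push_cast; ring
    have h2 : ((segs.length - 2 - k : Nat) : Int) + 2 = ((segs.length - 2 - k + 2 : Nat) : Int) := by
      push_cast; ring
    rw [hj, h1, h2, PySem.List.slice_to_natCast, PySem.List.pyGetD_natCast,
        PySem.List.pyGetD_natCast, PySem.List.slice_from_natCast]
    unfold pvMergeAt
    simp
  rw [List.map_congr_left hpt]
  simp

-- ===== VERDICT (by name: the statement is the Claim_ definition above) =====
theorem namelist_possibilities_spec : Claim_equal_namelist_possibilities := by
  intro namestr _
  unfold Spec_namelist_possibilities namelist_possibilities namelist_possibilities_alt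
  have hr : pvRawSegmentsB namestr = pvRawSegmentsA namestr := rfl
  have hm : pvStickyMergeB (pvRawSegmentsA namestr) = pvStickyMergeA (pvRawSegmentsA namestr) := rfl
  simp only [hr, hm]
  by_cases hraw : (pvRawSegmentsA namestr).isEmpty
  · simp [hraw]
  · simp only [hraw, Bool.false_eq_true, if_false]
    generalize pvStickyMergeA (pvRawSegmentsA namestr) = segs
    by_cases h3 : 3 ≤ segs.length
    · rw [if_neg (by omega), if_neg (by omega),
          if_neg (by intro h; rw [List.isEmpty_iff] at h; subst h; simp at h3),
          pv_enumA_eq segs h3, pv_enumB_eq segs (by omega)]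
    · rcases segs with _ | ⟨a, _ | ⟨b, _ | ⟨c, t⟩⟩⟩
      · simp
      · rw [if_pos (by simp), if_neg (by simp), pv_enumB_eq [a] (by simp)]
        simp [pvOutAll]
      · rw [if_neg (by simp), if_pos (by simp), if_neg (by simp), pv_enumB_eq [a, b] (by simp)]
        simp [pvOutAll, pvMergeAt, PySem.List.pyGetD, List.getD]
      · exfalso; apply h3; simp
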